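-- pv_equiv track=rewrite | github.com/linhdvu14/cp-sols | sols/CodeForces/1844_d12/B_Permutations_Primes.py | solve
-- ===== SOURCE A (Python) =====
-- def solve(N):
--     if N < 3: return list(range(1, N + 1))
--
--     res = [-1] * N
--     res[N // 2] = 1
--     res[0], res[-1] = 2, 3
--     x = 4
--     for i in range(N):
--         if res[i] == -1:
--             res[i] = x
--             x += 1
--
--     return res
-- ===== SOURCE B (Python) =====
-- def solve(N):
--     if N < 3: return list(range(1, N + 1))
--     fillers = list(range(4, N + 1))
--     k = N // 2 - 1
--     return [2] + fillers[:k] + [1] + fillers[k:] + [3]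
-- ===== Notes on version B (the rewrite author's own statement) =====
-- stated objective: simpler
-- what changed: Replaces the -1 sentinel array, the three index assignments and the index-scanning fill loop with a direct slice-based assembly: fillers 4..N are split at k = N//2 - 1 and concatenated around 1, between 2 and 3.
import Mathlib
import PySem

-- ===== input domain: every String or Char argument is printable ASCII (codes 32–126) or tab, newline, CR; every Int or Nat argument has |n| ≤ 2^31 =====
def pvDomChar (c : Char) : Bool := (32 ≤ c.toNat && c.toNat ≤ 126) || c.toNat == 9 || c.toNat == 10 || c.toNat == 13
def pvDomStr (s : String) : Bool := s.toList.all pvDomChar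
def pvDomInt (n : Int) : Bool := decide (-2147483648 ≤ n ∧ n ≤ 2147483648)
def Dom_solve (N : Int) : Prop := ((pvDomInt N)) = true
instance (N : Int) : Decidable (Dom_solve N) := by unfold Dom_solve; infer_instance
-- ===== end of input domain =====

-- B replaces A's -1 sentinel array, index assignments and index-scanning fill loop
-- with a direct slice-based assembly of the answer (objective: simpler).

-- ===== PORT A =====
def solve (N : Int) : List Int :=
  if N < 3 then PySem.List.pyRange 1 (N + 1) 1
  else
    let res0 := List.replicate N.toNat (-1 : Int)
    let res1 := PySem.List.pySetD res0 (PySem.Int.floordiv N 2) 1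
    let res2 := PySem.List.pySetD res1 0 2
    let res3 := PySem.List.pySetD res2 (-1) 3
    ((PySem.List.pyRange 0 N 1).foldl
      (fun (st : List Int × Int) i =>
        if PySem.List.pyGetD st.1 i 0 == -1 then
          (PySem.List.pySetD st.1 i st.2, st.2 + 1)
        else st) (res3, 4)).1

-- ===== PORT B =====
def solve_alt (N : Int) : List Int :=
  if N < 3 then PySem.List.pyRange 1 (N + 1) 1
  else
    let fillers := PySem.List.pyRange 4 (N + 1) 1
    let k := PySem.Int.floordiv N 2 - 1
    [2] ++ PySem.List.slice fillers none (some k) ++ [1] ++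
      PySem.List.slice fillers (some k) none ++ [3]

-- ===== PRECONDITION & SPEC =====
def Spec_solve (N : Int) (out : List Int) : Prop := out = solve_alt N
instance (N : Int) (out : List Int) : Decidable (Spec_solve N out) := by unfold Spec_solve; infer_instance

-- ===== CLAIM (what is proved, stated in full; the proofs are below) =====
def Claim_equal_solve : Prop := ∀ (N : Int), Dom_solve N → Spec_solve N (solve N)

-- ===== LEMMAS AND PROOFS =====

-- A's fill loop, per Nat index
def stepN (st : List Int × Int) (k : Nat) : List Int × Int :=
  if st.1.getD k 0 = -1 then (st.1.set k st.2, st.2 + 1) else st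

-- structural form of A's fill loop: replace each -1 left-to-right with x, x+1, …
def fillAux : List Int → Int → List Int
  | [], _ => []
  | a :: t, x => if a = -1 then x :: fillAux t (x + 1) else a :: fillAux t x

lemma fillAux_cons (a : Int) (t : List Int) (x : Int) :
    fillAux (a :: t) x = if a = -1 then x :: fillAux t (x + 1) else a :: fillAux t x := by
  rw [fillAux.eq_def]

-- A's index loop over a list that is pre (already scanned) ++ suf is the structural fill of suf
lemma fill_loop (suf pre : List Int) (x : Int) :
    (List.range' pre.length suf.length).foldl stepN (pre ++ suf, x)
      = (pre ++ fillAux suf x, x + (suf.countP (· = -1) : Nat)) := by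
  induction suf generalizing pre x with
  | nil => simp [fillAux]
  | cons a t ih =>
    rw [List.length_cons, List.range'_succ, List.foldl_cons]
    have hget : (pre ++ a :: t).getD pre.length 0 = a := by
      rw [List.getD_eq_getElem _ _ (by simp)]
      simp
    by_cases ha : a = -1
    · have hset : (pre ++ a :: t).set pre.length x = (pre ++ [x]) ++ t := by
        rw [List.set_append_right _ _ (le_refl _)]
        simp
      have h1 : stepN (pre ++ a :: t, x) pre.length = ((pre ++ [x]) ++ t, x + 1) := by
        simp [stepN, ha]
      rw [h1]
      have hlen : pre.length + 1 = (pre ++ [x]).length := by simp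
      rw [hlen, ih]
      rw [fillAux_cons, if_pos ha, List.countP_cons, if_pos (by simp [ha])]
      simp
      ring
    · have h1 : stepN (pre ++ a :: t, x) pre.length = ((pre ++ [a]) ++ t, x) := by
        simp [stepN, ha]
      rw [h1]
      have hlen : pre.length + 1 = (pre ++ [a]).length := by simp
      rw [hlen, ih]
      rw [fillAux_cons, if_neg ha, List.countP_cons, if_neg (by simp [ha])]
      simp [List.append_assoc]

-- filling a block of k sentinels writes x, x+1, …, x+k-1
lemma fillAux_replicate (k : Nat) (rest : List Int) (x : Int) :
    fillAux (List.replicate k (-1) ++ rest) x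
      = (List.range k).map (fun j : Nat => x + (j : Int)) ++ fillAux rest (x + (k : Int)) := by
  induction k generalizing x with
  | zero => simp
  | succ k ih =>
    rw [List.replicate_succ, List.cons_append, fillAux_cons, if_pos rfl]
    rw [ih, List.range_succ_eq_map, List.map_cons, List.map_map, List.cons_append]
    congr 1
    · simp
    congr 1
    · apply List.map_congr_left
      intro j _
      simp [Function.comp]
      ring
    · congr 1
      push_cast; ring

-- the array A builds before its loop: 2, sentinels, 1 at n/2, sentinels, 3
lemma res3_shape (n m : Nat) (h3 : 3 ≤ n) (hm : m = n / 2) :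
    (((List.replicate n (-1:Int)).set m 1).set 0 2).set (n-1) 3
      = 2 :: (List.replicate (m-1) (-1) ++ 1 :: (List.replicate (n-m-2) (-1) ++ [3])) := by
  have hm1 : 1 ≤ m := by omega
  have hm2 : m ≤ n - 2 := by omega
  have step1 : (List.replicate n (-1:Int)).set m 1
      = List.replicate m (-1) ++ 1 :: List.replicate (n-m-1) (-1) := by
    rw [List.set_eq_take_append_cons_drop, if_pos (by simp; omega)]
    rw [List.take_replicate, List.drop_replicate, min_eq_left (by omega),
      (by omega : n - (m + 1) = n - m - 1)]
  rw [step1]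
  have hmrep : List.replicate m (-1:Int) = -1 :: List.replicate (m-1) (-1) := by
    cases m with
    | zero => omega
    | succ k => simp [List.replicate_succ]
  rw [hmrep]
  simp only [List.cons_append, List.set_cons_zero]
  have hn1 : n - 1 = (n - 2) + 1 := by omega
  rw [hn1, List.set_cons_succ]
  congr 1
  rw [List.set_append_right _ _ (by simp; omega)]
  congr 1
  have hidx : n - 2 - (List.replicate (m-1) (-1:Int)).length = (n-m-2) + 1 := by
    simp; omega
  rw [hidx, List.set_cons_succ]
  congr 1
  rw [List.set_eq_take_append_cons_drop, if_pos (by simp; omega)]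
  rw [List.take_replicate, List.drop_replicate, min_eq_left (by omega),
    (by omega : n - m - 1 - (n - m - 2 + 1) = 0)]
  simp

-- Python's res[-1] = v on a nonempty list sets the last element
lemma pySetD_neg_one (xs : List Int) (h : xs ≠ []) (v : Int) :
    PySem.List.pySetD xs (-1) v = xs.set (xs.length - 1) v := by
  have hl : 0 < xs.length := List.length_pos_of_ne_nil h
  simp only [PySem.List.pySetD, PySem.List.pySet?, PySem.List.pyIdx?]
  rw [if_neg (by omega), if_pos (show -(↑xs.length:Int) ≤ -1 by omega)]
  simp

theorem solve_eq_alt_of_ge_three (n : Nat) (h3 : 3 ≤ n) :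
    solve (n : Int) = solve_alt (n : Int) := by
  have hnlt : ¬ ((n : Int) < 3) := by exact_mod_cast not_lt.mpr (by exact_mod_cast h3)
  set m := n / 2 with hm
  have hm1 : 1 ≤ m := by omega
  have hm2 : m ≤ n - 2 := by omega
  have hfd : PySem.Int.floordiv (n : Int) 2 = ((m : Nat) : Int) := by
    exact_mod_cast PySem.Int.floordiv_natCast n 2
  -- the common normal form
  set NF : List Int := 2 :: ((List.range (m-1)).map (fun j : Nat => (4:Int) + (j:Int)) ++
      1 :: ((List.range (n-m-2)).map (fun j : Nat => ((m:Int) + 3) + (j:Int)) ++ [3])) with hNF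
  -- ===== A side =====
  have hA : solve (n : Int) = NF := by
    rw [solve, if_neg hnlt]
    simp only [Int.toNat_natCast, hfd, PySem.List.pySetD_natCast]
    rw [show ∀ xs : List Int, PySem.List.pySetD xs 0 2 = xs.set 0 2 from fun xs => by
      rw [PySem.List.pySetD_of_nonneg xs 2 (by norm_num)]; norm_num]
    have hlen2 : ((((List.replicate n (-1:Int)).set m 1).set 0 2)).length = n := by simp
    rw [pySetD_neg_one _ (by
      apply List.ne_nil_of_length_pos; rw [hlen2]; omega) 3, hlen2]
    rw [res3_shape n m h3 hm]
    -- the loop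
    rw [PySem.List.pyRange_one, List.foldl_map]
    have hfun : (fun (st : List Int × Int) (k : Nat) =>
        if PySem.List.pyGetD st.1 ((0:Int) + (k:Int)) 0 == -1 then
          (PySem.List.pySetD st.1 ((0:Int) + (k:Int)) st.2, st.2 + 1) else st) = stepN := by
      funext st k
      simp [stepN, PySem.List.pyGetD_natCast, PySem.List.pySetD_natCast]
    rw [hfun]
    have hrange : (((n:Int) - 0).toNat) = n := by simp
    rw [hrange]
    have hRlen : (2 :: (List.replicate (m-1) (-1:Int) ++ 1 ::
        (List.replicate (n-m-2) (-1) ++ [3]))).length = n := by simp; omega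
    have hloop := fill_loop (2 :: (List.replicate (m-1) (-1:Int) ++ 1 ::
        (List.replicate (n-m-2) (-1) ++ [3]))) [] 4
    rw [List.length_nil, List.nil_append, List.nil_append, hRlen] at hloop
    rw [List.range_eq_range', hloop]
    rw [fillAux_cons, if_neg (by norm_num)]
    rw [fillAux_replicate, fillAux_cons, if_neg (by norm_num)]
    rw [fillAux_replicate]
    rw [fillAux_cons, if_neg (by norm_num)]
    simp only [fillAux]
    rw [hNF]
    congr 3
    congr 1
    apply List.map_congr_left
    intro j _
    have : ((m-1 : Nat) : Int) = (m : Int) - 1 := by omega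
    rw [this]; ring
  -- ===== B side =====
  have hB : solve_alt (n : Int) = NF := by
    have hk : PySem.Int.floordiv (n : Int) 2 - 1 = (((m - 1 : Nat)) : Int) := by
      rw [hfd]; omega
    rw [solve_alt, if_neg hnlt]
    simp only [hk, PySem.List.pyRange_one, PySem.List.slice_to_natCast,
      PySem.List.slice_from_natCast]
    have hr : (((n:Int) + 1 - 4).toNat) = (m-1) + (n-m-2) := by omega
    rw [hr, List.range_add, List.map_append, List.take_left' (by simp), List.drop_left' (by simp)]
    rw [hNF]
    simp only [List.map_map, List.cons_append, List.nil_append, List.append_assoc]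
    congr 3
    congr 1
    apply List.map_congr_left
    intro j _
    simp [Function.comp]
    omega
  rw [hA, hB]

-- ===== VERDICT (by name: the statement is the Claim_ definition above) =====
theorem solve_spec : Claim_equal_solve := by
  intro N _
  unfold Spec_solve
  by_cases hN : N < 3
  · rw [solve, solve_alt, if_pos hN, if_pos hN]
  · have h3 : (3:Int) ≤ N := not_lt.mp hN
    obtain ⟨n, rfl⟩ : ∃ n : Nat, N = (n : Int) := ⟨N.toNat, by omega⟩
    exact solve_eq_alt_of_ge_three n (by exact_mod_cast h3)
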